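-- pv_equiv track=rewrite | github.com/Matias-RC/SokobanRL | log.py | calculate_box_lines
-- ===== SOURCE A (Python) =====
-- def calculate_box_lines(solution):
--     if not solution or solution == 'x':
--         return 0
--     current_dir = None
--     box_lines = 0
--     for action in solution:
--         if isinstance(action, list) or isinstance(action, tuple):
--             if action[-1] == 1:  # Push action
--                 dir_idx = action[:-1].index(1)
--                 new_dir = ['up', 'down', 'left', 'right'][dir_idx]
--                 if new_dir != current_dir:
--                     box_lines += 1
--                     current_dir = new_dir
--             else:
--                 current_dir = None
--     return box_lines
-- ===== SOURCE B (Python) =====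
-- def calculate_box_lines(solution):
--     if not solution or solution == 'x':
--         return 0
--     # Stage 1: project each list/tuple action to its push-direction index (None for non-push).
--     seq = [action[:-1].index(1) if action[-1] == 1 else None
--            for action in solution
--            if isinstance(action, (list, tuple))]
--     # Stage 2: consume the sequence run by run: skip None entries; on a direction,
--     # count one box line and swallow the whole maximal run of that same direction.
--     count = 0
--     i = 0
--     n = len(seq)
--     while i < n:
--         d = seq[i]
--         i += 1
--         if d is not None:
--             count += 1
--             while i < n and seq[i] == d:
--                 i += 1
--     return count
-- ===== Notes on version B (the rewrite author's own statement) =====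
-- stated objective: alternative
-- what changed: Replaces A's stateful current_dir/counter loop by a run-consuming scan: first project actions to direction keys, then repeatedly strip a whole maximal run (swallowing equal neighbours with an inner loop) and count one line per non-None run; no previous-direction state is carried between runs.
import Mathlib
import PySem

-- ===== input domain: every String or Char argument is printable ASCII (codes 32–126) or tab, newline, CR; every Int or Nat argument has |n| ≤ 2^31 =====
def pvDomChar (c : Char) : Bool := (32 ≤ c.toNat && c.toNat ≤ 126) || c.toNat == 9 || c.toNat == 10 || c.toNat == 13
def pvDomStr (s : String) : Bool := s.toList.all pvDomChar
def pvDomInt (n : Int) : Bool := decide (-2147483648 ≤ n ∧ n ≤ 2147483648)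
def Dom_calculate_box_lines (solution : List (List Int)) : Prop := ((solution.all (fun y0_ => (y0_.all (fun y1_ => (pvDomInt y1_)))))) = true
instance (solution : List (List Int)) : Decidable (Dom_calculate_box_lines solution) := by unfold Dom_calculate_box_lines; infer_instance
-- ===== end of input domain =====

-- B replaces A's stateful current_dir/counter loop by a two-stage run-consuming scan:
-- project actions to direction keys, then strip whole maximal runs, counting one per
-- non-None run (alternative decomposition, same cost).


-- ===== PORT A =====
-- loop body of A's for-loop; state = (current_dir, box_lines).
-- Where Python raises (action[-1] on [], .index(1) missing, direction list index ≥ 4)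
-- the port takes a default via getD; those inputs are excluded by Pre_.
def pvAStep (st : Option String × Int) (action : List Int) : Option String × Int :=
  if (PySem.List.pyGet? action (-1)).getD 0 = 1 then
    let dir_idx : Nat := (PySem.List.index? action.dropLast 1).getD 0
    let new_dir : String := (PySem.List.pyGet? ["up", "down", "left", "right"] (dir_idx : Int)).getD ""
    if some new_dir ≠ st.1 then (some new_dir, st.2 + 1) else st
  else (none, st.2)

def calculate_box_lines (solution : List (List Int)) : Int :=
  if solution = [] then 0
  else (solution.foldl pvAStep (none, 0)).2

-- ===== PORT B =====
-- stage 1 of B: the direction key of a push (None for a non-push)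
def pvBKey (action : List Int) : Option Nat :=
  if (PySem.List.pyGet? action (-1)).getD 0 = 1
  then some ((PySem.List.index? action.dropLast 1).getD 0)
  else none

-- stage 2 of B: consume the key sequence run by run; the inner while loop that
-- swallows the maximal run of equal keys is the dropWhile.
def pvConsumeRuns : List (Option Nat) → Int
  | [] => 0
  | none :: rest => pvConsumeRuns rest
  | some d :: rest => 1 + pvConsumeRuns (rest.dropWhile (fun c => c == some d))
termination_by l => l.length
decreasing_by
  · simp
  · simp only [List.length_cons]
    exact Nat.lt_succ_of_le (List.length_dropWhile_le _ _)

def calculate_box_lines_alt (solution : List (List Int)) : Int :=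
  if solution = [] then 0
  else pvConsumeRuns (solution.map pvBKey)

-- ===== PRECONDITION & SPEC =====
-- Pre_ excludes exactly the inputs where A raises: an empty action (IndexError on
-- action[-1]), a push action with no 1 before its last slot (ValueError from .index),
-- or a push whose first 1 sits at index ≥ 4 (IndexError on the 4-name direction list).
def Pre_calculate_box_lines (solution : List (List Int)) : Prop :=
  ∀ a ∈ solution, a ≠ [] ∧ (a.getLast? = some 1 → (PySem.List.index? a.dropLast 1).getD 4 < 4)
instance (solution : List (List Int)) : Decidable (Pre_calculate_box_lines solution) := by
  unfold Pre_calculate_box_lines; infer_instance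

def pvWitness_calculate_box_lines : List (List Int) := [[1, 0, 0, 0, 1], [0, 0], [0, 1, 0, 0, 1]]

def Spec_calculate_box_lines (solution : List (List Int)) (out : Int) : Prop := out = calculate_box_lines_alt solution
instance (solution : List (List Int)) (out : Int) : Decidable (Spec_calculate_box_lines solution out) := by unfold Spec_calculate_box_lines; infer_instance

-- ===== CLAIM (what is proved, stated in full; the proofs are below) =====
def Claim_equal_calculate_box_lines : Prop := ∀ (solution : List (List Int)), Dom_calculate_box_lines solution → Pre_calculate_box_lines solution → Spec_calculate_box_lines solution (calculate_box_lines solution)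

-- ===== LEMMAS AND PROOFS =====

-- the run-start count, in the previous-key-carrying form matching A's loop state
def pvRuns (prev : Option Nat) : List (Option Nat) → Nat
  | [] => 0
  | c :: rest => (if c.isSome ∧ c ≠ prev then 1 else 0) + pvRuns c rest

-- B's run-consuming scan, generalized by the key of the run being swallowed
def pvConsumeFrom (prev : Option Nat) (seq : List (Option Nat)) : Int :=
  match prev with
  | none => pvConsumeRuns seq
  | some d => pvConsumeRuns (seq.dropWhile (fun c => c == some d))

theorem pvConsume_eq_runs (seq : List (Option Nat)) : ∀ prev,
    pvConsumeFrom prev seq = (pvRuns prev seq : Int) := by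
  induction seq with
  | nil => intro prev; rcases prev with _ | d <;> simp [pvConsumeFrom, pvConsumeRuns, pvRuns]
  | cons c rest ih =>
    intro prev
    rcases prev with _ | d
    · rcases c with _ | e
      · simpa [pvConsumeFrom, pvConsumeRuns, pvRuns] using ih none
      · have := ih (some e)
        simp only [pvConsumeFrom] at this
        simp [pvConsumeFrom, pvConsumeRuns, pvRuns, this]
    · rcases c with _ | e
      · have := ih none
        simp only [pvConsumeFrom] at this
        simp [pvConsumeFrom, pvConsumeRuns, pvRuns, List.dropWhile, this]
      · by_cases he : e = d
        · subst he
          have := ih (some e)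
          simp only [pvConsumeFrom] at this
          simp [pvConsumeFrom, pvRuns, List.dropWhile, this]
        · have hbe : (e == d) = false := beq_eq_false_iff_ne.mpr he
          have := ih (some e)
          simp only [pvConsumeFrom] at this
          simp [pvConsumeFrom, pvConsumeRuns, pvRuns, List.dropWhile, hbe, this, he]

def pvDirStr (i : Nat) : String :=
  (PySem.List.pyGet? ["up", "down", "left", "right"] (i : Int)).getD ""

theorem pvDirStr_inj {i j : Nat} (hi : i < 4) (hj : j < 4) :
    (pvDirStr i = pvDirStr j) ↔ i = j := by
  interval_cases i <;> interval_cases j <;> decide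

theorem pvLoop_eq (l : List (List Int)) : ∀ (cur : Option Nat) (cnt : Int),
    (∀ a ∈ l, a ≠ [] ∧ (a.getLast? = some 1 → (PySem.List.index? a.dropLast 1).getD 4 < 4)) →
    (∀ i, cur = some i → i < 4) →
    (l.foldl pvAStep (cur.map pvDirStr, cnt)).2 = cnt + (pvRuns cur (l.map pvBKey) : Int) := by
  induction l with
  | nil => intro cur cnt _ _; simp [pvRuns]
  | cons a l ih =>
    intro cur cnt hpre hcur
    obtain ⟨hne, hidx⟩ := hpre a (by simp)
    have hpre' := fun b hb => hpre b (List.mem_cons_of_mem _ hb)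
    simp only [List.foldl_cons, List.map_cons]
    by_cases hpush : (PySem.List.pyGet? a (-1)).getD 0 = 1
    · -- push action
      have hlast : a.getLast? = some 1 := by
        rw [PySem.List.pyGet?_neg_one] at hpush
        rcases h : a.getLast? with _ | w
        · exact absurd (List.getLast?_eq_none_iff.mp h) hne
        · rw [h] at hpush; simp at hpush; rw [hpush]
      have hidx4 := hidx hlast
      obtain ⟨v, hv, hvlt⟩ : ∃ v, PySem.List.index? a.dropLast 1 = some v ∧ v < 4 := by
        rcases h : PySem.List.index? a.dropLast 1 with _ | v
        · rw [h] at hidx4; simp at hidx4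
        · exact ⟨v, rfl, by rw [h] at hidx4; simpa using hidx4⟩
      have hkey : pvBKey a = some v := by
        simp only [pvBKey, if_pos hpush, hv, Option.getD_some]
      have hiff : (some (pvDirStr v) ≠ Option.map pvDirStr cur) ↔ (some v ≠ cur) := by
        rcases cur with _ | j
        · simp
        · have hj : j < 4 := hcur j rfl
          simp [pvDirStr_inj hvlt hj]
      have hstep : pvAStep (cur.map pvDirStr, cnt) a =
          if some v ≠ cur then (some (pvDirStr v), cnt + 1) else (cur.map pvDirStr, cnt) := by
        unfold pvAStep
        rw [if_pos hpush]
        simp only [hv, Option.getD_some]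
        exact if_congr hiff rfl rfl
      rw [hstep]
      by_cases hneq : some v ≠ cur
      · rw [if_pos hneq]
        have h1 : (some (pvDirStr v), cnt + 1) = ((some v).map pvDirStr, cnt + 1) := rfl
        rw [h1, ih (some v) (cnt + 1) hpre' (by rintro i hi; cases hi; exact hvlt)]
        simp only [pvRuns, hkey, Option.isSome_some, true_and, if_pos hneq]
        push_cast
        ring
      · rw [if_neg hneq]
        rw [ih cur cnt hpre' hcur]
        simp [pvRuns, hkey, not_ne_iff.mp hneq]
    · -- non-push action
      have hkey : pvBKey a = none := by simp [pvBKey, hpush]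
      have hstep : pvAStep (cur.map pvDirStr, cnt) a = (none, cnt) := by
        unfold pvAStep
        rw [if_neg hpush]
      have h0 : ((none : Option String), cnt) = ((none : Option Nat).map pvDirStr, cnt) := rfl
      rw [hstep, h0, ih none cnt hpre' (by simp)]
      simp [pvRuns, hkey]

-- ===== VERDICT (by name: the statement is the Claim_ definition above) =====
theorem calculate_box_lines_spec : Claim_equal_calculate_box_lines := by
  intro solution _ hpre
  unfold Spec_calculate_box_lines calculate_box_lines calculate_box_lines_alt
  by_cases h : solution = []
  · simp [h]
  · rw [if_neg h, if_neg h]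
    have hB : pvConsumeRuns (solution.map pvBKey) = (pvRuns none (solution.map pvBKey) : Int) := by
      simpa [pvConsumeFrom] using pvConsume_eq_runs (solution.map pvBKey) none
    rw [hB]
    have := pvLoop_eq solution none 0 hpre (by simp)
    simpa using this
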